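-- pv_equiv track=rewrite | github.com/SP321/leetcode | number-of-subarrays-that-match-a-pattern-ii/solution.py | zf
-- ===== SOURCE A (Python) =====
-- def zf(s):
--     n = len(s)
--     z = [0] * n
--     z[0]=len(s)
--     l, r = 0, 0
--     for i in range(1, n):
--         if i < r:
--             z[i] = min(z[i-l], r - i)
--         while i + z[i] < n and s[i + z[i]] == s[z[i]]:
--             z[i] += 1
--         if i + z[i] > r:
--             l = i
--             r = i + z[i]
--     return z
-- ===== SOURCE B (Python) =====
-- def zf(s):
--     n = len(s)
--     def match_len(i):
--         k = 0
--         while i + k < n and s[i + k] == s[k]: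
--             k += 1
--         return k
--     return [match_len(i) for i in range(n)]
-- ===== Notes on version B (the rewrite author's own statement) =====
-- stated objective: simpler
-- what changed: Replaces the linear Z-algorithm with l/r window bookkeeping and reuse branch by the direct quadratic definition: each z[i] is the plain prefix-match extension from 0, computed uniformly by a comprehension (z[0]=n falls out of the same scan).
import Mathlib
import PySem

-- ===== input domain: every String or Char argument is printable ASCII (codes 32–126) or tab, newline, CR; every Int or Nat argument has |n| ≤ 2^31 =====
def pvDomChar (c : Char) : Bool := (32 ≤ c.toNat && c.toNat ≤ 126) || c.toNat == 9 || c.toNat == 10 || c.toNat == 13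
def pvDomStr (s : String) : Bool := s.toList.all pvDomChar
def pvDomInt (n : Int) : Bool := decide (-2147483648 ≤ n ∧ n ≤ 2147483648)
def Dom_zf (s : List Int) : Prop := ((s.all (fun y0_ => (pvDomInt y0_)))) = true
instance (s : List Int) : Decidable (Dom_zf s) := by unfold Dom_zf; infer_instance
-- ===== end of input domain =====

-- B replaces A's linear Z-algorithm (l/r window, reuse branch) by the direct quadratic
-- definition: every z[i] is the plain prefix-match extension from 0 (objective: simpler).

-- ===== PORT A =====
-- A's inner 'while i + z[i] < n and s[i+z[i]] == s[z[i]]: z[i] += 1' (indices always in range here)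
def zfExtA (s : List Int) (i k : Nat) : Nat :=
  if h : i + k < s.length ∧ s.getD (i + k) 0 = s.getD k 0 then zfExtA s i (k + 1) else k
termination_by s.length - (i + k)
decreasing_by omega

-- A's for-loop over range(1, n), carrying z and the Z-box (l, r)
-- the while loop's start value: min(z[i-l], r-i) when i < r, else the current z[i] (= 0)
def zfStartK (z : List Int) (i l r : Nat) : Nat :=
  if i < r then min (z.getD (i - l) 0).toNat (r - i) else (z.getD i 0).toNat

def zfLoopA (s : List Int) (i : Nat) (z : List Int) (l r : Nat) : List Int :=
  if _h : i < s.length then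
    zfLoopA s (i + 1) (z.set i (zfExtA s i (zfStartK z i l r) : Int))
      (if r < i + zfExtA s i (zfStartK z i l r) then i else l)
      (if r < i + zfExtA s i (zfStartK z i l r) then i + zfExtA s i (zfStartK z i l r) else r)
  else z
termination_by s.length - i

def zf (s : List Int) : List Int :=
  let n := s.length
  let z := (List.replicate n (0 : Int)).set 0 (n : Int)   -- z = [0]*n; z[0] = len(s) (IndexError on n = 0, excluded by Pre_)
  zfLoopA s 1 z 0 0

-- ===== PORT B =====
-- B's match_len inner while loop (same comparison loop, always started at k = 0)
def zfMatchLen (s : List Int) (i k : Nat) : Nat :=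
  if h : i + k < s.length ∧ s.getD (i + k) 0 = s.getD k 0 then zfMatchLen s i (k + 1) else k
termination_by s.length - (i + k)
decreasing_by omega

def zf_alt (s : List Int) : List Int :=
  (List.range s.length).map (fun i => (zfMatchLen s i 0 : Int))

-- ===== PRECONDITION & SPEC =====
-- Pre_ excludes only the empty list, on which A raises IndexError at 'z[0] = len(s)'.
def Pre_zf (s : List Int) : Prop := s ≠ []
instance (s : List Int) : Decidable (Pre_zf s) := by unfold Pre_zf; infer_instance
def pvWitness_zf : List Int := [1, 1, 2, 1, 1]

def Spec_zf (s : List Int) (out : List Int) : Prop := out = zf_alt s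
instance (s : List Int) (out : List Int) : Decidable (Spec_zf s out) := by unfold Spec_zf; infer_instance

-- ===== CLAIM (what is proved, stated in full; the proofs are below) =====
def Claim_equal_zf : Prop := ∀ (s : List Int), Dom_zf s → Pre_zf s → Spec_zf s (zf s)

-- ===== LEMMAS AND PROOFS =====

-- B's loop and A's loop are the same extension recursion
theorem zfMatchLen_eq (s : List Int) (i k : Nat) : zfMatchLen s i k = zfExtA s i k := by
  fun_induction zfMatchLen s i k with
  | case1 k h ih => rw [zfExtA, dif_pos h]; exact ih
  | case2 k h => rw [zfExtA, dif_neg h]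

-- the "naive" Z-value B computes
def zNaive (s : List Int) (i : Nat) : Nat := zfExtA s i 0

theorem zfExtA_le (s : List Int) (i k : Nat) (hk : i + k ≤ s.length) :
    i + zfExtA s i k ≤ s.length := by
  fun_induction zfExtA s i k with
  | case1 k h ih => exact ih (by omega)
  | case2 k h => exact hk

-- matched-prefix property of the extension's result
theorem zfExtA_match (s : List Int) (i k : Nat) (m : Nat) (hm1 : k ≤ m) (hm2 : m < zfExtA s i k) :
    i + m < s.length ∧ s.getD (i + m) 0 = s.getD m 0 := by
  fun_induction zfExtA s i k with
  | case1 k h ih =>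
    rcases Nat.lt_or_ge m (k + 1) with h1 | h1
    · have : m = k := by omega
      subst this; exact h
    · exact ih h1 hm2
  | case2 k h => omega

-- extension started at a matched prefix k gives the same value as started at 0
theorem zfExtA_step (s : List Int) (i j : Nat)
    (h : i + j < s.length ∧ s.getD (i + j) 0 = s.getD j 0) :
    zfExtA s i j = zfExtA s i (j + 1) := by
  rw [zfExtA, dif_pos h]

theorem zfExtA_eq_of_prefix (s : List Int) (i k : Nat)
    (h : ∀ m, m < k → i + m < s.length ∧ s.getD (i + m) 0 = s.getD m 0) :
    zfExtA s i 0 = zfExtA s i k := by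
  induction k with
  | zero => rfl
  | succ k ih =>
    rw [ih (fun m hm => h m (by omega)), zfExtA_step s i k (h k (by omega))]

theorem zNaive_zero (s : List Int) : ∀ j, j ≤ s.length → zfExtA s 0 j = s.length := by
  intro j hj
  induction hn : s.length - j generalizing j with
  | zero =>
    rw [zfExtA, dif_neg (by omega)]; omega
  | succ m ih =>
    rw [zfExtA, dif_pos ⟨by omega, by rw [Nat.zero_add]⟩]
    exact ih (j + 1) (by omega) (by omega)

-- loop invariant of A's scan
def InvA (s : List Int) (i : Nat) (z : List Int) (l r : Nat) : Prop :=
  z.length = s.length ∧ l ≤ r ∧ r ≤ s.length ∧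
  (∀ j, j < s.length → z.getD j 0 = if j < i then (zNaive s j : Int) else 0) ∧
  ((r = 0 ∧ l = 0) ∨
    (1 ≤ l ∧ l < i ∧ ∀ m, m < r - l → s.getD (l + m) 0 = s.getD m 0))

theorem zfLoopA_correct (s : List Int) (i : Nat) (z : List Int) (l r : Nat)
    (hi : 1 ≤ i) (hinv : InvA s i z l r) :
    zfLoopA s i z l r = (List.range s.length).map (fun j => (zNaive s j : Int)) := by
  obtain ⟨hlen, hlr, hrn, hz, hwin⟩ := hinv
  rw [zfLoopA]
  split
  · next hiN =>
    -- computed zi equals zNaive s i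
    have hzi : zfExtA s i (zfStartK z i l r) = zNaive s i := by
      unfold zfStartK
      split
      · next hir =>
        -- window case
        rcases hwin with ⟨hr0, _⟩ | ⟨hl1, hli, hw⟩
        · omega
        have hil : i - l < i := by omega
        have hzil : z.getD (i - l) 0 = (zNaive s (i - l) : Int) := by
          rw [hz (i - l) (by omega), if_pos hil]
        rw [hzil]
        have : ((zNaive s (i - l) : Int)).toNat = zNaive s (i - l) := by simp
        rw [this]
        refine (zfExtA_eq_of_prefix s i _ ?_).symm
        intro m hm
        have hm1 : m < zNaive s (i - l) := by omega
        have hm2 : m < r - i := by omega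
        have hin : i + m < s.length := by omega
        refine ⟨hin, ?_⟩
        have e1 : s.getD (l + ((i - l) + m)) 0 = s.getD ((i - l) + m) 0 :=
          hw ((i - l) + m) (by omega)
        have e2 : s.getD ((i - l) + m) 0 = s.getD m 0 :=
          (zfExtA_match s (i - l) 0 m (by omega) hm1).2
        have e3 : l + ((i - l) + m) = i + m := by omega
        rw [e3] at e1
        rw [e1, e2]
      · next hir =>
        have : z.getD i 0 = 0 := by rw [hz i hiN, if_neg (by omega)]
        rw [this]
        rfl
    rw [hzi]
    -- re-establish the invariant at i + 1
    refine zfLoopA_correct s (i + 1) _ _ _ (by omega) ?_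
    constructor
    · simpa using hlen
    constructor
    · split <;> simp_all
    constructor
    · have hle : i + zNaive s i ≤ s.length := zfExtA_le s i 0 (by omega)
      split <;> simp_all
    constructor
    · intro j hj
      rcases eq_or_ne j i with rfl | hne
      · rw [List.getD_eq_getElem?_getD, List.getElem?_set_self (by omega)]
        simp
      · rw [List.getD_eq_getElem?_getD, List.getElem?_set_ne (by omega)]
        rw [← List.getD_eq_getElem?_getD, hz j hj]
        rcases Nat.lt_or_ge j i with h1 | h1
        · rw [if_pos (by omega), if_pos (by omega)]
        · rw [if_neg (by omega), if_neg (by omega)]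
    · split
      · next hlt =>
        refine Or.inr ⟨by omega, by omega, ?_⟩
        intro m hm
        have hm' : m < zNaive s i := by omega
        exact (zfExtA_match s i 0 m (by omega) hm').2
      · rcases hwin with ⟨hr0, hl0⟩ | ⟨hl1, hli, hw⟩
        · exact Or.inl ⟨hr0, hl0⟩
        · exact Or.inr ⟨hl1, by omega, hw⟩
  · next hiN =>
    -- loop finished: z is exactly the table of naive Z-values
    apply List.ext_getElem
    · simpa using hlen
    intro j h1 h2
    have hj : j < s.length := by omega
    have := hz j hj
    rw [List.getD_eq_getElem?_getD, List.getElem?_eq_getElem h1] at this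
    simpa [if_pos (show j < i by omega)] using this
termination_by s.length - i
decreasing_by omega

-- ===== VERDICT (by name: the statement is the Claim_ definition above) =====
theorem zf_spec : Claim_equal_zf := by
  intro s _hdom hpre
  unfold Spec_zf zf zf_alt
  have hn : 1 ≤ s.length := by
    cases s with
    | nil => exact absurd rfl hpre
    | cons a t => simp
  rw [zfLoopA_correct s 1 _ 0 0 le_rfl ?_]
  · apply List.map_congr_left
    intro j hj
    rw [zfMatchLen_eq]
    rfl
  · refine ⟨by simp, le_rfl, by omega, ?_, Or.inl ⟨rfl, rfl⟩⟩
    intro j hj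
    rcases Nat.lt_or_ge j 1 with h1 | h1
    · interval_cases j
      rw [if_pos (by omega), List.getD_eq_getElem?_getD,
        List.getElem?_set_self (by simpa using hn)]
      have : zNaive s 0 = s.length := zNaive_zero s 0 (by omega)
      simp [this]
    · rw [if_neg (by omega), List.getD_eq_getElem?_getD,
        List.getElem?_set_ne (by omega), List.getElem?_replicate]
      simp [hj]
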